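-- pv_equiv track=rewrite | github.com/nomorecoke/prediction-herobot | et_to_en.py | cleanup_sentences
-- ===== SOURCE A (Python) =====
-- import string
--
-- MAX_WORD_LEN = 20
--
-- def cleanup_sentences(en_sentences, et_sentences, max_word_len=MAX_WORD_LEN):
--     new_en_sentences = []
--     new_et_sentences = []
--
--     # Remove some sentences (if len(sentence.split()) > max_word_len)
--     for i in range(len(en_sentences)):
--         en_s = en_sentences[i].strip()
--         et_s = et_sentences[i].strip()
--
--         if ';' in en_sentences[i]:
--             # Split some lines using ';'
--             if en_sentences[i].count(';') == et_sentences[i].count(';'):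
--                 split_en_sentences = en_sentences[i].split(';')
--                 split_et_sentences = et_sentences[i].split(';')
--
--                 for i in range(len(split_en_sentences)):
--                     if len(split_en_sentences[i].split()) <= max_word_len and \
--                             len(split_et_sentences[i].split()) <= max_word_len:
--                         new_en_sentences.append(split_en_sentences[i])
--                         new_et_sentences.append(split_et_sentences[i])
--                 continue
--
--         if len(en_s.split()) <= max_word_len and len(et_s.split()) <= max_word_len:
--             new_en_sentences.append(en_s)
--             new_et_sentences.append(et_s)
--
--     en_sentences = new_en_sentences
--     et_sentences = new_et_sentences
--     new_en_sentences = []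
--     new_et_sentences = []
--     trans_table = str.maketrans('', '', string.punctuation)
--     for i in range(len(en_sentences)):
--         en_s = en_sentences[i]
--         et_s = et_sentences[i]
--
--         # lower case
--         en_s = en_s.lower()
--         et_s = et_s.lower()
--         # tokenize
--         en_s = en_s.split()
--         et_s = et_s.split()
--         # remove punctuations
--         en_s = [word.translate(trans_table) for word in en_s]
--         et_s = [word.translate(trans_table) for word in et_s]
--
--         # remove empty word
--         en_s = [word for word in en_s if word != '']
--         et_s = [word for word in et_s if word != '']
--
--         # Remove Empty lines
--         if len(en_s) == 0 or len(et_s) == 0: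
--             continue
--
--         new_en_sentences.append(' '.join(en_s))
--         new_et_sentences.append(' '.join(et_s))
--
--     return new_en_sentences, new_et_sentences
-- ===== SOURCE B (Python) =====
-- import string
--
-- MAX_WORD_LEN = 20
--
-- _PUNCT = set(string.punctuation)
--
--
-- def _word_count(s):
--     # count maximal whitespace-separated runs with one character scan
--     n = 0
--     prev_space = True
--     for c in s:
--         if c.isspace():
--             prev_space = True
--         else:
--             if prev_space:
--                 n += 1
--             prev_space = False
--     return n
--
--
-- def _normalize(s):
--     # one-pass state machine: lowercase, drop punctuation, collect words
--     out = []
--     word = []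
--     for c in s.lower():
--         if c.isspace():
--             if word:
--                 out.append(''.join(word))
--                 word = []
--         elif c not in _PUNCT:
--             word.append(c)
--     if word:
--         out.append(''.join(word))
--     return out
--
--
-- def cleanup_sentences(en_sentences, et_sentences, max_word_len=MAX_WORD_LEN):
--     out_en, out_et = [], []
--     for en_raw, et_raw in zip(en_sentences, et_sentences):
--         if ';' in en_raw and en_raw.count(';') == et_raw.count(';'):
--             pairs = list(zip(en_raw.split(';'), et_raw.split(';')))
--         else:
--             pairs = [(en_raw.strip(), et_raw.strip())]
--         for e, t in pairs:
--             if _word_count(e) <= max_word_len and _word_count(t) <= max_word_len: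
--                 ne, nt = _normalize(e), _normalize(t)
--                 if ne and nt:
--                     out_en.append(' '.join(ne))
--                     out_et.append(' '.join(nt))
--     return out_en, out_et
-- ===== Notes on version B (the rewrite author's own statement) =====
-- stated objective: alternative
-- what changed: A's two staged list-pipeline passes (build intermediate filtered sentence lists via len(split()) tests, then normalize each via lower/split/translate/filter/join) are replaced by a single fused pass whose per-sentence work is done by hand-rolled character-level state machines: a scanner that counts whitespace-separated words without splitting, and a one-pass scanner that lowercases, drops punctuation and collects words directly, so no intermediate sentence lists, no str.split() tokenization for counting and no translate/filter/join pipeline exist in B.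
import Mathlib
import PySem

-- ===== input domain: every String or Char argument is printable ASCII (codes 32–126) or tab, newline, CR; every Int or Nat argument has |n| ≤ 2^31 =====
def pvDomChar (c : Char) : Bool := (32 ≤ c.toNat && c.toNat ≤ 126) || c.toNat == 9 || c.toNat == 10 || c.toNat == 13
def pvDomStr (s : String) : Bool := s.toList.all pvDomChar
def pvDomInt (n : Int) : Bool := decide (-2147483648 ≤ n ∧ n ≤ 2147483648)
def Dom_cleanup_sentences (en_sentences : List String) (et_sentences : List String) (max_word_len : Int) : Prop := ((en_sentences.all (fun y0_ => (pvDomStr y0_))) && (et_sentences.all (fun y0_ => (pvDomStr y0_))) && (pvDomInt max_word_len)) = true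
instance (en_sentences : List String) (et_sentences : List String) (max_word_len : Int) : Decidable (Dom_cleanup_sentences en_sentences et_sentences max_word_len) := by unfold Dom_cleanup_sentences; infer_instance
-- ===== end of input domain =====

-- B replaces A's two staged split/translate/filter/join list pipelines by one fused pass using character-level
-- state machines (word counting without splitting; normalization as a one-pass scanner); return values proved equal on Pre_.

-- ===== PORT A =====
-- string.punctuation, and word.translate(str.maketrans('', '', string.punctuation)) ported by hand as
-- deleting exactly those characters — exact on the printable-ASCII domain.
def pvPunct : List Char := ['!', '"', '#', '$', '%', '&', '\'', '(', ')', '*', '+', ',', '-', '.', '/', ':', ';', '<', '=', '>', '?', '@', '[', '\\', ']', '^', '_', '`', '{', '|', '}', '~']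

def pvTranslate (w : String) : String := String.ofList (w.toList.filter (fun c => !(pvPunct.contains c)))

-- len(x.split()) <= max_word_len and len(y.split()) <= max_word_len
def pvLenOk (mw : Int) (e t : String) : Bool :=
  decide (((PySem.Str.split₀ e).length : Int) ≤ mw) && decide (((PySem.Str.split₀ t).length : Int) ≤ mw)

-- body of A's first loop (one i of 'for i in range(len(en_sentences))'); the inner loop over the ';'-split
-- segments is the nested index fold; 'fallback' is the code reached by falling through the ';' branch
def pvPhase1Step (mw : Int) (en_sentences et_sentences : List String) (acc : List String × List String) (i : Int) : List String × List String :=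
  let enI := PySem.List.pyGetD en_sentences i ""
  let etI := PySem.List.pyGetD et_sentences i ""
  let en_s := PySem.Str.strip enI
  let et_s := PySem.Str.strip etI
  let fallback := if pvLenOk mw en_s et_s then (acc.1 ++ [en_s], acc.2 ++ [et_s]) else acc
  if PySem.Str.isIn ";" enI then
    if PySem.Str.count enI ";" == PySem.Str.count etI ";" then
      let se := PySem.Chars.splitOn enI.toList [';']
      let st := PySem.Chars.splitOn etI.toList [';']
      (PySem.List.pyRange 0 (PySem.List.len se) 1).foldl
        (fun acc j =>
          let e := String.ofList (PySem.List.pyGetD se j [])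
          let t := String.ofList (PySem.List.pyGetD st j [])
          if pvLenOk mw e t then (acc.1 ++ [e], acc.2 ++ [t]) else acc) acc
    else fallback
  else fallback

-- body of A's second loop: lower, tokenize, strip punctuation, drop empty words, skip empty lines
def pvPhase2Step (p1 p2 : List String) (acc : List String × List String) (i : Int) : List String × List String :=
  let en_s := PySem.List.pyGetD p1 i ""
  let et_s := PySem.List.pyGetD p2 i ""
  let enw := ((PySem.Str.split₀ (PySem.Str.lower en_s)).map pvTranslate).filter (fun w => w != "")
  let etw := ((PySem.Str.split₀ (PySem.Str.lower et_s)).map pvTranslate).filter (fun w => w != "")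
  if enw.length = 0 ∨ etw.length = 0 then acc
  else (acc.1 ++ [PySem.Str.join " " enw], acc.2 ++ [PySem.Str.join " " etw])

def cleanup_sentences (en_sentences : List String) (et_sentences : List String) (max_word_len : Int) : List String × List String :=
  let p := (PySem.List.pyRange 0 (PySem.List.len en_sentences) 1).foldl
    (pvPhase1Step max_word_len en_sentences et_sentences) ([], [])
  (PySem.List.pyRange 0 (PySem.List.len p.1) 1).foldl (pvPhase2Step p.1 p.2) ([], [])

-- ===== PORT B =====
-- _word_count(s) of Source B: one scan, state (n, prev_space); c.isspace() is PySem.Chars.isspace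
def pvWordCount (s : String) : Nat :=
  (s.toList.foldl
    (fun st c =>
      if PySem.Chars.isspace c then (st.1, true)
      else ((if st.2 then st.1 + 1 else st.1), false))
    (0, true)).1

-- the loop of _normalize(s): out = accumulated words, word = current word buffer (kept chars only)
def pvNormGo : List Char → List (List Char) → List Char → List (List Char)
  | [], out, word => out ++ (if word.isEmpty then [] else [word])
  | c :: rest, out, word =>
    if PySem.Chars.isspace c then
      (if word.isEmpty then pvNormGo rest out [] else pvNormGo rest (out ++ [word]) [])
    else if pvPunct.contains c then pvNormGo rest out word
    else pvNormGo rest out (word ++ [c])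

-- _normalize(s) of Source B: scan s.lower(), ''.join each collected word buffer
def pvNorm (s : String) : List String :=
  (pvNormGo (PySem.Chars.lower s.toList) [] []).map String.ofList

-- the per-line candidate pairs of Source B ('pairs')
def pvCands (p : String × String) : List (String × String) :=
  if PySem.Str.isIn ";" p.1 && (PySem.Str.count p.1 ";" == PySem.Str.count p.2 ";") then
    ((PySem.Chars.splitOn p.1.toList [';']).map String.ofList).zip
      ((PySem.Chars.splitOn p.2.toList [';']).map String.ofList)
  else [(PySem.Str.strip p.1, PySem.Str.strip p.2)]

-- Source B's inner 'for e, t in pairs' body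
def pvEmit (mw : Int) (acc : List String × List String) (q : String × String) : List String × List String :=
  if ((pvWordCount q.1 : Int) ≤ mw ∧ (pvWordCount q.2 : Int) ≤ mw) then
    let ne := pvNorm q.1
    let nt := pvNorm q.2
    if ne ≠ [] ∧ nt ≠ [] then
      (acc.1 ++ [PySem.Str.join " " ne], acc.2 ++ [PySem.Str.join " " nt])
    else acc
  else acc

def cleanup_sentences_alt (en_sentences : List String) (et_sentences : List String) (max_word_len : Int) : List String × List String :=
  (en_sentences.zip et_sentences).foldl
    (fun acc p => (pvCands p).foldl (pvEmit max_word_len) acc) ([], [])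

-- ===== PRECONDITION & SPEC =====
-- A indexes et_sentences[i] for every i < len(en_sentences): it raises IndexError when et_sentences is shorter.
def Pre_cleanup_sentences (en_sentences : List String) (et_sentences : List String) (max_word_len : Int) : Prop :=
  en_sentences.length ≤ et_sentences.length
instance (en_sentences : List String) (et_sentences : List String) (max_word_len : Int) : Decidable (Pre_cleanup_sentences en_sentences et_sentences max_word_len) := by unfold Pre_cleanup_sentences; infer_instance

def pvWitness_cleanup_sentences : List String × List String × Int := (["hello; a", "x"], ["tere; b", "y"], 3)

def Spec_cleanup_sentences (en_sentences : List String) (et_sentences : List String) (max_word_len : Int) (out : List String × List String) : Prop := out = cleanup_sentences_alt en_sentences et_sentences max_word_len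
instance (en_sentences : List String) (et_sentences : List String) (max_word_len : Int) (out : List String × List String) : Decidable (Spec_cleanup_sentences en_sentences et_sentences max_word_len out) := by unfold Spec_cleanup_sentences; infer_instance

-- ===== CLAIM (what is proved, stated in full; the proofs are below) =====
def Claim_equal_cleanup_sentences : Prop := ∀ (en_sentences : List String) (et_sentences : List String) (max_word_len : Int), Dom_cleanup_sentences en_sentences et_sentences max_word_len → Pre_cleanup_sentences en_sentences et_sentences max_word_len → Spec_cleanup_sentences en_sentences et_sentences max_word_len (cleanup_sentences en_sentences et_sentences max_word_len)

-- ===== LEMMAS AND PROOFS =====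

-- A's per-line phase-1 body, as a function of the two fetched strings (proof-side view of pvPhase1Step)
def pvAStep1 (mw : Int) (acc : List String × List String) (x y : String) : List String × List String :=
  let en_s := PySem.Str.strip x
  let et_s := PySem.Str.strip y
  let fallback := if pvLenOk mw en_s et_s then (acc.1 ++ [en_s], acc.2 ++ [et_s]) else acc
  if PySem.Str.isIn ";" x then
    if PySem.Str.count x ";" == PySem.Str.count y ";" then
      let se := PySem.Chars.splitOn x.toList [';']
      let st := PySem.Chars.splitOn y.toList [';']
      (PySem.List.pyRange 0 (PySem.List.len se) 1).foldl
        (fun acc j =>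
          let e := String.ofList (PySem.List.pyGetD se j [])
          let t := String.ofList (PySem.List.pyGetD st j [])
          if pvLenOk mw e t then (acc.1 ++ [e], acc.2 ++ [t]) else acc) acc
    else fallback
  else fallback

-- A's per-line phase-2 body, on a pair
def pvEmitA (acc : List String × List String) (q : String × String) : List String × List String :=
  let enw := ((PySem.Str.split₀ (PySem.Str.lower q.1)).map pvTranslate).filter (fun w => w != "")
  let etw := ((PySem.Str.split₀ (PySem.Str.lower q.2)).map pvTranslate).filter (fun w => w != "")
  if enw.length = 0 ∨ etw.length = 0 then acc
  else (acc.1 ++ [PySem.Str.join " " enw], acc.2 ++ [PySem.Str.join " " etw])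

-- the candidates A's phase 1 appends for one line = B's candidates filtered by the length test
def pvCandsA (mw : Int) (p : String × String) : List (String × String) :=
  (pvCands p).filter (fun q => pvLenOk mw q.1 q.2)

-- count.go is affine in its accumulator
theorem pvCountGoAcc (sub : List Char) : ∀ (fuel : Nat) (l : List Char) (acc : Nat),
    PySem.Chars.count.go sub fuel l acc = acc + PySem.Chars.count.go sub fuel l 0 := by
  intro fuel
  induction fuel with
  | zero => intro l acc; simp [PySem.Chars.count.go]
  | succ f ih =>
    intro l acc
    cases l with
    | nil => simp [PySem.Chars.count.go]
    | cons c rest =>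
      rw [PySem.Chars.count.go, PySem.Chars.count.go]
      split
      · rw [ih _ (acc + 1), ih _ (0 + 1)]; omega
      · exact ih rest acc

theorem pvSplitGoLen (sep : List Char) (hsep : sep ≠ []) :
    ∀ (f1 : Nat) (l : List Char), l.length < f1 → ∀ (f2 : Nat), l.length ≤ f2 →
      ∀ (cur : List Char) (acc : List (List Char)),
        (PySem.Chars.splitOn.go sep f1 l cur acc).length = acc.length + 1 + PySem.Chars.count.go sep f2 l 0 := by
  intro f1
  induction f1 with
  | zero => intro l hl; omega
  | succ f ih =>
    intro l hl f2 hf2 cur acc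
    cases l with
    | nil =>
      cases f2 <;> simp [PySem.Chars.splitOn.go, PySem.Chars.count.go]
    | cons c rest =>
      cases f2 with
      | zero => simp at hf2
      | succ f2' =>
        rw [PySem.Chars.splitOn.go, PySem.Chars.count.go]
        split
        · rename_i hpre
          have hslen : 1 ≤ sep.length := by
            cases sep with
            | nil => exact absurd rfl hsep
            | cons _ _ => simp
          have hple : sep.length ≤ (c :: rest).length :=
            (List.isPrefixOf_iff_prefix.mp hpre).length_le
          rw [ih _ (by simp at hl ⊢; omega) f2' (by simp at hf2 ⊢; omega)]
          rw [pvCountGoAcc sep f2' (List.drop sep.length (c :: rest)) (0 + 1)]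
          simp; omega
        · rw [ih rest (by simp at hl; omega) f2' (by simp at hf2; omega)]

-- len(s.split(';')) = s.count(';') + 1
theorem pvSplitLen (s : List Char) :
    (PySem.Chars.splitOn s [';']).length = PySem.Chars.count s [';'] + 1 := by
  rw [PySem.Chars.splitOn, PySem.Chars.count]
  simp only [List.isEmpty_cons]
  rw [pvSplitGoLen [';'] (by simp) (s.length + 1) s (by omega) s.length (le_refl _) [] []]
  simp; omega

-- 'for i in range(len(l1)): … l1[i] … l2[i] …' over two lists, the first no longer, is a fold over zip
theorem pvZR {α β γ : Type} (F : γ → α → β → γ) (d1 : α) (d2 : β) :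
    ∀ (l1 : List α) (l2 : List β), l1.length ≤ l2.length → ∀ (init : γ),
      (List.range l1.length).foldl (fun acc k => F acc (l1.getD k d1) (l2.getD k d2)) init
      = (l1.zip l2).foldl (fun acc p => F acc p.1 p.2) init := by
  intro l1
  induction l1 with
  | nil => intro l2 h init; simp
  | cons a l1' ih =>
    intro l2 h init
    cases l2 with
    | nil => simp at h
    | cons b l2' =>
      rw [List.length_cons, List.range_succ_eq_map]
      simp only [List.foldl_cons, List.foldl_map, List.getD_cons_zero, List.getD_cons_succ,
        List.zip_cons_cons]
      exact ih l2' (by simpa using h) _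

theorem pvZ {α β γ : Type} (F : γ → α → β → γ) (d1 : α) (d2 : β)
    (l1 : List α) (l2 : List β) (h : l1.length ≤ l2.length) (init : γ) :
    (PySem.List.pyRange 0 (PySem.List.len l1) 1).foldl
      (fun acc i => F acc (PySem.List.pyGetD l1 i d1) (PySem.List.pyGetD l2 i d2)) init
    = (l1.zip l2).foldl (fun acc p => F acc p.1 p.2) init := by
  rw [PySem.List.pyRange_one]
  simp only [PySem.List.len_eq, sub_zero, Int.toNat_natCast, List.foldl_map, zero_add,
    PySem.List.pyGetD_natCast]
  exact pvZR F d1 d2 l1 l2 h init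

-- a pair-accumulator loop that appends on both sides is two flatMaps
theorem pvPairFlat {σ τ : Type} (h1 h2 : σ → List τ) :
    ∀ (l : List σ) (acc : List τ × List τ),
      l.foldl (fun acc q => (acc.1 ++ h1 q, acc.2 ++ h2 q)) acc
      = (acc.1 ++ l.flatMap h1, acc.2 ++ l.flatMap h2) := by
  intro l
  induction l with
  | nil => intro acc; simp
  | cons x t ih => intro acc; simp [ih, List.append_assoc]

-- running an inner fold over f x is folding the flattened list
theorem pvFoldlFlat {σ τ γ : Type} (f : σ → List τ) (g : γ → τ → γ) :
    ∀ (l : List σ) (acc : γ),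
      l.foldl (fun a x => (f x).foldl g a) acc = (l.flatMap f).foldl g acc := by
  intro l
  induction l with
  | nil => intro acc; rfl
  | cons x t ih => intro acc; simp [ih, List.foldl_append]

theorem pvZipMapMk : ∀ (se st : List (List Char)),
    (se.map String.ofList).zip (st.map String.ofList)
    = (se.zip st).map (fun q => (String.ofList q.1, String.ofList q.2)) := by
  intro se
  induction se with
  | nil => intro st; simp
  | cons a t ih =>
    intro st
    cases st with
    | nil => simp
    | cons b t2 => simp [ih]

theorem pvInner2 (mw : Int) : ∀ (l : List (List Char × List Char)) (acc : List String × List String),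
    l.foldl (fun acc p =>
        if pvLenOk mw (String.ofList p.1) (String.ofList p.2) then
          (acc.1 ++ [String.ofList p.1], acc.2 ++ [String.ofList p.2]) else acc) acc
    = (acc.1 ++ ((l.map (fun q => (String.ofList q.1, String.ofList q.2))).filter
          (fun q => pvLenOk mw q.1 q.2)).map Prod.fst,
       acc.2 ++ ((l.map (fun q => (String.ofList q.1, String.ofList q.2))).filter
          (fun q => pvLenOk mw q.1 q.2)).map Prod.snd) := by
  intro l
  induction l with
  | nil => intro acc; simp
  | cons x t ih =>
    intro acc
    by_cases hx : pvLenOk mw (String.ofList x.1) (String.ofList x.2) <;>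
      simp [hx, ih, List.append_assoc]

theorem pvInner (mw : Int) (se st : List (List Char)) (h : se.length ≤ st.length)
    (acc : List String × List String) :
    (PySem.List.pyRange 0 (PySem.List.len se) 1).foldl
      (fun acc j =>
        let e := String.ofList (PySem.List.pyGetD se j [])
        let t := String.ofList (PySem.List.pyGetD st j [])
        if pvLenOk mw e t then (acc.1 ++ [e], acc.2 ++ [t]) else acc) acc
    = (acc.1 ++ (((se.map String.ofList).zip (st.map String.ofList)).filter
          (fun q => pvLenOk mw q.1 q.2)).map Prod.fst,
       acc.2 ++ (((se.map String.ofList).zip (st.map String.ofList)).filter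
          (fun q => pvLenOk mw q.1 q.2)).map Prod.snd) := by
  rw [pvZipMapMk se st]
  exact (pvZ (fun acc e t =>
      if pvLenOk mw (String.ofList e) (String.ofList t) then
        (acc.1 ++ [String.ofList e], acc.2 ++ [String.ofList t]) else acc) [] []
      se st h acc).trans (pvInner2 mw (se.zip st) acc)

-- one iteration of A's first loop appends exactly the filtered candidates of that line
set_option maxHeartbeats 1000000 in
theorem pvStep1_eq (mw : Int) (x y : String) (acc : List String × List String) :
    pvAStep1 mw acc x y
    = (acc.1 ++ (pvCandsA mw (x, y)).map Prod.fst, acc.2 ++ (pvCandsA mw (x, y)).map Prod.snd) := by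
  simp only [pvAStep1, pvCandsA, pvCands]
  cases hin : PySem.Str.isIn ";" x with
  | false =>
    simp only [hin, Bool.false_eq_true, if_false, Bool.false_and]
    by_cases hok : pvLenOk mw (PySem.Str.strip x) (PySem.Str.strip y) <;>
      simp [hok, List.filter]
  | true =>
    cases hcnt : (PySem.Str.count x ";" == PySem.Str.count y ";") with
    | false =>
      simp only [hin, hcnt, Bool.true_and, Bool.false_eq_true, if_false, if_true]
      by_cases hok : pvLenOk mw (PySem.Str.strip x) (PySem.Str.strip y) <;>
        simp [hok, List.filter]
    | true =>
      simp only [hin, hcnt, Bool.true_and, if_true]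
      have hlen : (PySem.Chars.splitOn x.toList [';']).length
          = (PySem.Chars.splitOn y.toList [';']).length := by
        have hc : PySem.Chars.count x.toList [';'] = PySem.Chars.count y.toList [';'] := by
          have := beq_iff_eq.mp hcnt
          simpa [PySem.Str.count] using this
        rw [pvSplitLen, pvSplitLen, hc]
      exact pvInner mw _ _ (le_of_eq hlen) acc

-- A's first pass, as the flattened filtered candidate list of the zipped input
theorem pvPhase1_eq (mw : Int) (en et : List String) (h : en.length ≤ et.length) :
    (PySem.List.pyRange 0 (PySem.List.len en) 1).foldl (pvPhase1Step mw en et) ([], [])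
    = (((en.zip et).flatMap (pvCandsA mw)).map Prod.fst,
       ((en.zip et).flatMap (pvCandsA mw)).map Prod.snd) := by
  refine (pvZ (pvAStep1 mw) "" "" en et h ([], [])).trans ?_
  have hfun : (fun (acc : List String × List String) (p : String × String) =>
        pvAStep1 mw acc p.1 p.2)
      = (fun (acc : List String × List String) (p : String × String) =>
        (acc.1 ++ (pvCandsA mw p).map Prod.fst, acc.2 ++ (pvCandsA mw p).map Prod.snd)) := by
    funext acc p
    simpa using pvStep1_eq mw p.1 p.2 acc
  rw [hfun]
  refine (pvPairFlat (fun p => (pvCandsA mw p).map Prod.fst)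
      (fun p => (pvCandsA mw p).map Prod.snd) _ ([], [])).trans ?_
  simp [List.map_flatMap]

-- A's second pass over the aligned pair list is the fold of pvEmitA
theorem pvPhase2_eq (L : List (String × String)) :
    (PySem.List.pyRange 0 (PySem.List.len (L.map Prod.fst)) 1).foldl
      (pvPhase2Step (L.map Prod.fst) (L.map Prod.snd)) ([], [])
    = L.foldl pvEmitA ([], []) := by
  refine (pvZ (fun acc x y => pvEmitA acc (x, y)) "" "" (L.map Prod.fst) (L.map Prod.snd)
      (by simp) ([], [])).trans ?_
  rw [List.zip_map']
  have hL : L.map (fun a => (a.1, a.2)) = L := by simp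
  rw [hL]

-- ---- B's word-count scanner computes len(s.split()) ----

-- word starts remaining in l, given whether the previous character was a space
def pvCS : List Char → Bool → Nat
  | [], _ => 0
  | c :: r, ps =>
    if PySem.Chars.isspace c then pvCS r true else (if ps then 1 else 0) + pvCS r false

theorem pvWCfold : ∀ (l : List Char) (n : Nat) (ps : Bool),
    (l.foldl
      (fun st c =>
        if PySem.Chars.isspace c then (st.1, true)
        else ((if st.2 then st.1 + 1 else st.1), false)) (n, ps)).1
    = n + pvCS l ps := by
  intro l
  induction l with
  | nil => intro n ps; simp [pvCS]
  | cons c r ih =>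
    intro n ps
    by_cases hc : PySem.Chars.isspace c
    · simp [pvCS, hc, ih]
    · cases ps <;> simp [pvCS, hc, ih] <;> omega

theorem pvGoLen : ∀ (l cur : List Char) (acc : List (List Char)),
    (PySem.Chars.split₀.go l cur acc).length
    = acc.length + (if cur.isEmpty then 0 else 1) + pvCS l cur.isEmpty := by
  intro l
  induction l with
  | nil =>
    intro cur acc
    by_cases hc : cur.isEmpty <;> simp [PySem.Chars.split₀.go, pvCS, hc]
  | cons c r ih =>
    intro cur acc
    rw [PySem.Chars.split₀.go.eq_2]
    by_cases hs : PySem.Chars.isspace c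
    · by_cases hc : cur.isEmpty <;> simp [hs, hc, ih, pvCS] <;> omega
    · by_cases hc : cur.isEmpty <;> simp [hs, hc, ih, pvCS] <;> omega

theorem pvWC_eq (s : String) : pvWordCount s = (PySem.Str.split₀ s).length := by
  have h := congrArg List.length (PySem.Str.split₀_map_toList s)
  simp only [List.length_map] at h
  rw [pvWordCount, pvWCfold, h, PySem.Chars.split₀, pvGoLen]
  simp

-- ---- B's normalization scanner computes A's lower/split/translate/filter pipeline ----

-- A's char-list word pipeline: strip punctuation, drop empty words
def pvPipe (l : List (List Char)) : List (List Char) :=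
  (l.map (fun w => w.filter (fun c => !(pvPunct.contains c)))).filter (fun w => w ≠ [])

theorem pvEqEmpty {l : List Char} (h : l = []) : l.isEmpty = true := by simp [h]
theorem pvNeEmpty {l : List Char} (h : ¬ l = []) : ¬ (l.isEmpty = true) := by simp [List.isEmpty_iff, h]

theorem pvPipeApp (xs : List (List Char)) (w : List Char) :
    pvPipe (xs ++ [w]) = pvPipe xs ++
      (if (w.filter (fun c => !(pvPunct.contains c))).isEmpty then []
       else [w.filter (fun c => !(pvPunct.contains c))]) := by
  simp only [pvPipe, List.map_append, List.map_cons, List.map_nil, List.filter_append]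
  congr 1
  by_cases h' : List.filter (fun c => !(pvPunct.contains c)) w = []
  · rw [if_pos (pvEqEmpty h'), h']
    simp
  · rw [if_neg (pvNeEmpty h'), List.filter_cons,
      if_pos (decide_eq_true (show List.filter (fun c => !(pvPunct.contains c)) w ≠ [] from h')),
      List.filter_nil]

theorem pvGoNorm : ∀ (l cur : List Char) (acc : List (List Char)),
    pvPipe (PySem.Chars.split₀.go l cur acc)
    = pvNormGo l (pvPipe acc.reverse) (cur.reverse.filter (fun c => !(pvPunct.contains c))) := by
  intro l
  induction l with
  | nil =>
    intro cur acc
    by_cases hc : cur.isEmpty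
    · have hcur : cur = [] := by simpa using hc
      subst hcur
      simp [PySem.Chars.split₀.go, pvNormGo]
    · have hc' : cur.isEmpty = false := by simpa using hc
      have hgo : PySem.Chars.split₀.go [] cur acc = acc.reverse ++ [cur.reverse] := by
        simp [PySem.Chars.split₀.go, hc']
      rw [hgo, pvPipeApp, pvNormGo]
  | cons c r ih =>
    intro cur acc
    rw [PySem.Chars.split₀.go.eq_2, pvNormGo.eq_2]
    by_cases hs : PySem.Chars.isspace c
    · rw [if_pos hs, if_pos hs]
      by_cases hc : cur.isEmpty
      · have hcur : cur = [] := by simpa using hc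
        subst hcur
        simpa using ih [] acc
      · have hc' : cur.isEmpty = false := by simpa using hc
        rw [if_neg (by simp [hc'])]
        have hstep := ih [] (cur.reverse :: acc)
        have hrev : (cur.reverse :: acc).reverse = acc.reverse ++ [cur.reverse] := by simp
        rw [hrev, pvPipeApp] at hstep
        by_cases hfil : (cur.reverse.filter (fun c => !(pvPunct.contains c))).isEmpty
        · rw [if_pos hfil]
          rw [if_pos hfil, List.append_nil] at hstep
          simpa using hstep
        · rw [if_neg hfil]
          rw [if_neg hfil] at hstep
          simpa using hstep
    · rw [if_neg hs, if_neg hs]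
      by_cases hp : pvPunct.contains c
      · rw [if_pos hp]
        have hp' : c ∈ pvPunct := by simpa using hp
        have hstep := ih (c :: cur) acc
        have hbuf : ((c :: cur).reverse.filter (fun c => !(pvPunct.contains c)))
            = cur.reverse.filter (fun c => !(pvPunct.contains c)) := by
          simp [List.filter_append, hp']
        rw [hbuf] at hstep
        exact hstep
      · rw [if_neg hp]
        have hp' : ¬ (c ∈ pvPunct) := by simpa using hp
        have hstep := ih (c :: cur) acc
        have hbuf : ((c :: cur).reverse.filter (fun c => !(pvPunct.contains c)))
            = cur.reverse.filter (fun c => !(pvPunct.contains c)) ++ [c] := by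
          simp [List.filter_append, hp']
        rw [hbuf] at hstep
        exact hstep

theorem pvStrSplit (t : String) :
    PySem.Str.split₀ t = (PySem.Chars.split₀ t.toList).map String.ofList := by
  rw [← PySem.Str.split₀_map_toList, List.map_map]
  have h : (String.ofList ∘ String.toList) = (id : String → String) := by
    funext u
    exact String.ofList_toList
  rw [h, List.map_id]

-- the word pipeline on char lists, pushed through String.ofList
theorem pvPipeMk : ∀ (L : List (List Char)),
    (pvPipe L).map String.ofList = ((L.map String.ofList).map pvTranslate).filter (fun w => w != "") := by
  intro L
  induction L with
  | nil => rfl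
  | cons w T ih =>
    have htr : pvTranslate (String.ofList w) = String.ofList (w.filter (fun c => !(pvPunct.contains c))) := by
      rw [pvTranslate, String.toList_ofList]
    by_cases hw : w.filter (fun c => !(pvPunct.contains c)) = []
    · have h2 : pvTranslate (String.ofList w) = "" := by rw [htr, hw]
      have hpipe : pvPipe (w :: T) = pvPipe T := by
        simp only [pvPipe, List.map_cons, List.filter_cons, hw]
        simp
      rw [hpipe, ih, List.map_cons, List.map_cons, List.filter_cons,
        if_neg (by rw [h2]; exact (by decide : ¬ ((("" : String) != "") = true)))]
    · have hne : String.ofList (w.filter (fun c => !(pvPunct.contains c))) ≠ "" := by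
        intro hc
        apply hw
        have h3 := congrArg String.toList hc
        rw [String.toList_ofList] at h3
        exact h3
      have h2 : pvTranslate (String.ofList w) ≠ "" := by rw [htr]; exact hne
      have hpipe : pvPipe (w :: T) = (w.filter (fun c => !(pvPunct.contains c))) :: pvPipe T := by
        rw [pvPipe, pvPipe, List.map_cons, List.filter_cons,
          if_pos (decide_eq_true (show (w.filter (fun c => !(pvPunct.contains c))) ≠ [] from hw))]
      rw [hpipe, List.map_cons, List.map_cons, List.map_cons, List.filter_cons,
        if_pos (show (pvTranslate (String.ofList w) != "") = true by
          rw [htr]; exact bne_iff_ne.mpr hne), ih, htr]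

theorem pvNorm_eq (s : String) :
    pvNorm s = ((PySem.Str.split₀ (PySem.Str.lower s)).map pvTranslate).filter (fun w => w != "") := by
  rw [pvStrSplit, PySem.Str.toList_lower, pvNorm, ← pvPipeMk]
  congr 1
  have h := pvGoNorm (PySem.Chars.lower s.toList) [] []
  simp only [List.reverse_nil, List.filter_nil] at h
  have hnil : pvPipe ([] : List (List Char)) = [] := rfl
  rw [hnil] at h
  exact h.symm

-- ---- per-pair: B's emit body = length-filter then pvEmitA ----

theorem pvEmit_eq (mw : Int) (acc : List String × List String) (q : String × String) :
    pvEmit mw acc q = if pvLenOk mw q.1 q.2 then pvEmitA acc q else acc := by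
  simp only [pvEmit, pvEmitA, pvLenOk, pvWC_eq, pvNorm_eq]
  by_cases h1 : ((PySem.Str.split₀ q.1).length : Int) ≤ mw
  · by_cases h2 : ((PySem.Str.split₀ q.2).length : Int) ≤ mw
    · rw [if_pos ⟨h1, h2⟩]
      rw [if_pos (show (decide (((PySem.Str.split₀ q.1).length : Int) ≤ mw)
          && decide (((PySem.Str.split₀ q.2).length : Int) ≤ mw)) = true by simp [h1, h2])]
      by_cases e1 : ((PySem.Str.split₀ (PySem.Str.lower q.1)).map pvTranslate).filter (fun w => w != "") = []
        <;> by_cases e2 : ((PySem.Str.split₀ (PySem.Str.lower q.2)).map pvTranslate).filter (fun w => w != "") = []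
        <;> simp [e1, e2, List.length_eq_zero_iff]
    · rw [if_neg (fun h => h2 h.2)]
      rw [if_neg (show ¬ ((decide (((PySem.Str.split₀ q.1).length : Int) ≤ mw)
          && decide (((PySem.Str.split₀ q.2).length : Int) ≤ mw)) = true) by simp [h2])]
  · rw [if_neg (fun h => h1 h.1)]
    rw [if_neg (show ¬ ((decide (((PySem.Str.split₀ q.1).length : Int) ≤ mw)
        && decide (((PySem.Str.split₀ q.2).length : Int) ≤ mw)) = true) by simp [h1])]

theorem pvFoldCands (mw : Int) (p : String × String) (acc : List String × List String) :
    (pvCandsA mw p).foldl pvEmitA acc = (pvCands p).foldl (pvEmit mw) acc := by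
  rw [pvCandsA, List.foldl_filter]
  congr 1
  funext a q
  exact (pvEmit_eq mw a q).symm

-- ===== VERDICT (by name: the statement is the Claim_ definition above) =====
set_option maxHeartbeats 1000000 in
theorem cleanup_sentences_spec : Claim_equal_cleanup_sentences := by
  intro en et mw _ hpre
  unfold Spec_cleanup_sentences
  show (let p := (PySem.List.pyRange 0 (PySem.List.len en) 1).foldl
          (pvPhase1Step mw en et) ([], [])
        (PySem.List.pyRange 0 (PySem.List.len p.1) 1).foldl (pvPhase2Step p.1 p.2) ([], []))
      = cleanup_sentences_alt en et mw
  rw [pvPhase1_eq mw en et hpre]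
  refine (pvPhase2_eq ((en.zip et).flatMap (pvCandsA mw))).trans ?_
  refine ((pvFoldlFlat (pvCandsA mw) pvEmitA (en.zip et) ([], [])).symm).trans ?_
  unfold cleanup_sentences_alt
  congr 1
  funext acc p
  exact pvFoldCands mw p acc
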